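-- pv_equiv track=rewrite | github.com/JesseGuerrero/MSCS-Thesis-2023-TAMUSA | parseCOCODatasets/reparseCOCO.py | parseTxt1ByCaption
-- ===== SOURCE A (Python) =====
-- def parseTxt1ByCaption(lines : list, by_image : bool) -> dict:
--     data = {}
--     if by_image:
--         for line in lines:
--             if line.split(":")[0] in data:
--                 data[line.split(":")[0]][0] = (data[line.split(":")[0]][0] + line.split(":")[1].replace("\n", " "))
--             if line.split(":")[0] not in data:
--                 data[line.split(":")[0]] = [line.split(":")[1].replace("\n", " ")]
--     if not by_image:
--         for line in lines:
--             if line.split(":")[0] in data: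
--                 data[line.split(":")[0]].append(line.split(":")[1].replace("\n", ""))
--             if line.split(":")[0] not in data:
--                 data[line.split(":")[0]] = [line.split(":")[1].replace("\n", "")]
--     return data
-- ===== SOURCE B (Python) =====
-- def parseTxt1ByCaption(lines: list, by_image: bool) -> dict:
--     grouped = {}
--     for line in lines:
--         parts = line.split(":")
--         grouped.setdefault(parts[0], []).append(parts[1])
--     if by_image:
--         return {k: ["".join(v.replace("\n", " ") for v in vals)]
--                 for k, vals in grouped.items()}
--     return {k: [v.replace("\n", "") for v in vals] for k, vals in grouped.items()}
-- ===== Notes on version B (the rewrite author's own statement) =====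
-- stated objective: simpler
-- what changed: B replaces A's two mode-specific dict-building loops (membership test + in-place element-0 string rewrite / append per line) by one mode-independent setdefault grouping pass over the raw split values followed by a per-mode reshaping comprehension (join for by_image, per-element replace otherwise).
import Mathlib
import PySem

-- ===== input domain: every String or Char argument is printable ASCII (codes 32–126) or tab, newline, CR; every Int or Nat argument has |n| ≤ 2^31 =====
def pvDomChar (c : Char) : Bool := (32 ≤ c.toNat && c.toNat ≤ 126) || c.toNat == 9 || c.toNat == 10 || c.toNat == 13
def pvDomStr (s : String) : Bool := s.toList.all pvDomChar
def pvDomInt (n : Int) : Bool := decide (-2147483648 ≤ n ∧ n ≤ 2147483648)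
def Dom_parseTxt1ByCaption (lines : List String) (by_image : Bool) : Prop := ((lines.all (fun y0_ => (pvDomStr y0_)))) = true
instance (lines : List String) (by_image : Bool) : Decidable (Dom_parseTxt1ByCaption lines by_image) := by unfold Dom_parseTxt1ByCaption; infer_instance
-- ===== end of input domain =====

-- B separates grouping from formatting: one setdefault/append grouping pass over the raw split(':')[1]
-- values, then a reshaping comprehension per mode (objective: simpler; same O(total input) cost).
-- Pre_ excludes inputs where some line has no ':' — there line.split(':')[1] raises IndexError in both programs.

-- shared helpers: key = line.split(":")[0], value = line.split(":")[1]
-- (pyGet? is exact; under Pre_ both indices exist, so .getD "" is never consulted on admitted inputs)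
def pvKey (line : String) : String :=
  (PySem.List.pyGet? ((PySem.Str.split? line ":").getD []) 0).getD ""
def pvVal (line : String) : String :=
  (PySem.List.pyGet? ((PySem.Str.split? line ":").getD []) 1).getD ""

-- ===== PORT A =====
-- Python '+' on str is exactly Lean's String append (list-append of the code points)
def pvStepImgA (d : PySem.Dict String (List String)) (line : String) :
    PySem.Dict String (List String) :=
  -- if line.split(":")[0] in data: data[key][0] = data[key][0] + line.split(":")[1].replace("\n", " ")
  let d1 := if d.contains (pvKey line) then
      d.modify (pvKey line) []
        (fun cur => PySem.List.pySetD cur 0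
          ((PySem.List.pyGetD cur 0 "") ++ PySem.Str.replace (pvVal line) "\n" " "))
    else d
  -- if line.split(":")[0] not in data: data[key] = [line.split(":")[1].replace("\n", " ")]
  if d1.contains (pvKey line) = false then
    d1.insert (pvKey line) [PySem.Str.replace (pvVal line) "\n" " "]
  else d1

def pvStepNoA (d : PySem.Dict String (List String)) (line : String) :
    PySem.Dict String (List String) :=
  -- if line.split(":")[0] in data: data[key].append(line.split(":")[1].replace("\n", ""))
  let d1 := if d.contains (pvKey line) then
      d.modify (pvKey line) [] (fun cur => cur ++ [PySem.Str.replace (pvVal line) "\n" ""])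
    else d
  -- if line.split(":")[0] not in data: data[key] = [line.split(":")[1].replace("\n", "")]
  if d1.contains (pvKey line) = false then
    d1.insert (pvKey line) [PySem.Str.replace (pvVal line) "\n" ""]
  else d1

def parseTxt1ByCaption (lines : List String) (by_image : Bool) : List (String × List String) :=
  let data : PySem.Dict String (List String) := PySem.Dict.empty
  let data := if by_image then lines.foldl pvStepImgA data else data
  let data := if !by_image then lines.foldl pvStepNoA data else data
  data.items

-- ===== PORT B =====
-- grouped.setdefault(parts[0], []).append(parts[1])  (append mutates the stored list)
def pvGroupStep (d : PySem.Dict String (List String)) (line : String) :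
    PySem.Dict String (List String) :=
  (d.setdefault (pvKey line) []).modify (pvKey line) [] (fun cur => cur ++ [pvVal line])

-- the dict comprehensions iterate grouped.items() (distinct keys, insertion order), so their
-- items are exactly the mapped items list
def parseTxt1ByCaption_alt (lines : List String) (by_image : Bool) :
    List (String × List String) :=
  let grouped := lines.foldl pvGroupStep PySem.Dict.empty
  if by_image then
    grouped.items.map (fun p =>
      (p.1, [PySem.Str.join "" (p.2.map (fun v => PySem.Str.replace v "\n" " "))]))
  else
    grouped.items.map (fun p => (p.1, p.2.map (fun v => PySem.Str.replace v "\n" "")))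

-- ===== PRECONDITION & SPEC =====
-- Pre_ excludes inputs where some line has no ':' — there line.split(':')[1] raises IndexError in A (and in B).
def Pre_parseTxt1ByCaption (lines : List String) (by_image : Bool) : Prop :=
  ∀ line ∈ lines, PySem.Str.isIn ":" line = true
instance (lines : List String) (by_image : Bool) :
    Decidable (Pre_parseTxt1ByCaption lines by_image) := by
  unfold Pre_parseTxt1ByCaption; infer_instance
def pvWitness_parseTxt1ByCaption : List String × Bool := (["img1:a cat\n", "img1:a dog\n", "img2:sea\n"], true)

def Spec_parseTxt1ByCaption (lines : List String) (by_image : Bool)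
    (out : List (String × List String)) : Prop := out = parseTxt1ByCaption_alt lines by_image
instance (lines : List String) (by_image : Bool) (out : List (String × List String)) :
    Decidable (Spec_parseTxt1ByCaption lines by_image out) := by
  unfold Spec_parseTxt1ByCaption; infer_instance

-- ===== CLAIM (what is proved, stated in full; the proofs are below) =====
def Claim_equal_parseTxt1ByCaption : Prop := ∀ (lines : List String) (by_image : Bool), Dom_parseTxt1ByCaption lines by_image → Pre_parseTxt1ByCaption lines by_image → Spec_parseTxt1ByCaption lines by_image (parseTxt1ByCaption lines by_image)

-- ===== LEMMAS AND PROOFS =====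

def pvRep0 (v : String) : String := PySem.Str.replace v "\n" ""
def pvRepSp (v : String) : String := PySem.Str.replace v "\n" " "
def pvImgF (cur : List String) (x : String) : List String :=
  PySem.List.pySetD cur 0 ((PySem.List.pyGetD cur 0 "") ++ x)

-- A's "append to data[key]" loop body is a single modify
theorem pvStepNoA_eq (d : PySem.Dict String (List String)) (line : String) :
    pvStepNoA d line = d.modify (pvKey line) [] (· ++ [pvRep0 (pvVal line)]) := by
  unfold pvStepNoA pvRep0
  by_cases h : d.contains (pvKey line)
  · simp [h, PySem.Dict.contains_modify]
  · simp only [Bool.not_eq_true] at h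
    simp [h, PySem.Dict.modify, PySem.Dict.getD_of_not_contains _ _ h]

-- B's setdefault-then-append grouping body is the same modify, on the raw value
theorem pvGroupStep_eq (d : PySem.Dict String (List String)) (line : String) :
    pvGroupStep d line = d.modify (pvKey line) [] (· ++ [pvVal line]) := by
  unfold pvGroupStep
  by_cases h : d.contains (pvKey line)
  · rw [PySem.Dict.setdefault_of_contains _ _ h]
  · simp only [Bool.not_eq_true] at h
    rw [PySem.Dict.setdefault_of_not_contains _ _ h]
    simp [PySem.Dict.modify, PySem.Dict.getD_of_not_contains _ _ h,
      PySem.Dict.getD_insert_self, PySem.Dict.insert_insert_self]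

-- A's by-image loop body is a single modify with default [""]
theorem pvStepImgA_eq (d : PySem.Dict String (List String)) (line : String) :
    pvStepImgA d line
      = d.modify (pvKey line) [""] (fun cur => pvImgF cur (pvRepSp (pvVal line))) := by
  unfold pvStepImgA pvRepSp pvImgF
  by_cases h : d.contains (pvKey line)
  · have h2 : (d.get? (pvKey line)).isSome := by
      rw [← PySem.Dict.contains_eq_isSome_get?]; exact h
    obtain ⟨v, hv⟩ := Option.isSome_iff_exists.mp h2
    simp [h, PySem.Dict.modify, PySem.Dict.getD_eq_get?_getD, hv]
  · simp only [Bool.not_eq_true] at h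
    simp [h, PySem.Dict.modify, PySem.Dict.getD_of_not_contains _ _ h,
      PySem.List.pySetD, PySem.List.pySet?, PySem.List.pyGetD, PySem.List.pyGet?, PySem.List.pyIdx?]

-- getD of the generic per-key modify fold (any combining function f, any default)
theorem pvGetD_foldl_modify (f : List String → String → List String) (d0 : List String)
    (l : List String) (d : PySem.Dict String (List String)) (c : String) :
    (l.foldl (fun d line => d.modify (pvKey line) d0 (fun cur => f cur (pvVal line))) d).getD c d0
      = ((l.filter (fun line => pvKey line == c)).map pvVal).foldl f (d.getD c d0) := by
  induction l generalizing d with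
  | nil => rfl
  | cons x t ih =>
    simp only [List.foldl_cons, List.filter_cons]
    by_cases hx : pvKey x = c
    · simp [hx, ih, PySem.Dict.getD_modify_self]
    · have : (pvKey x == c) = false := by simp [hx]
      simp [this, ih, PySem.Dict.getD_modify_of_ne _ _ _ (Ne.symm hx)]

-- keys of the per-key modify fold
theorem pvKeys_foldl_modify (f : List String → String → List String) (d0 : List String)
    (l : List String) (d : PySem.Dict String (List String)) :
    (l.foldl (fun d line => d.modify (pvKey line) d0 (fun cur => f cur (pvVal line))) d).keys
      = PySem.Set.update d.keys (l.map pvKey) :=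
  PySem.Dict.keys_foldl_modify_key l pvKey d0 (fun d line cur => f cur (pvVal line)) d

theorem pvNodup_foldl_modify (f : List String → String → List String) (d0 : List String)
    (l : List String) (d : PySem.Dict String (List String)) (h : d.keys.Nodup) :
    (l.foldl (fun d line => d.modify (pvKey line) d0 (fun cur => f cur (pvVal line))) d).keys.Nodup :=
  PySem.Dict.nodup_keys_foldl_modify_key l pvKey d0 (fun d line cur => f cur (pvVal line)) d h

-- folding pvImgF from a singleton is folding string concatenation
theorem pvFoldl_pvImgF (vs : List String) (s : String) :
    vs.foldl pvImgF [s] = [vs.foldl (· ++ ·) s] := by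
  induction vs generalizing s with
  | nil => rfl
  | cons v t ih =>
    simp only [List.foldl_cons]
    have : pvImgF [s] v = [s ++ v] := by
      simp [pvImgF, PySem.List.pySetD, PySem.List.pySet?, PySem.List.pyGetD,
        PySem.List.pyGet?, PySem.List.pyIdx?]
    rw [this, ih]

-- "".join(vs) is the left fold of append from ""
theorem pvFlattenSingleton (l : List String) (f : String → String) :
    (List.map (fun x => [f x]) l).flatten = List.map f l := by
  induction l with
  | nil => rfl
  | cons a t ih => simp [ih]

theorem pvJoinNil : ∀ (l : List (List Char)), PySem.Chars.join [] l = l.flatten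
  | [] => by simp [PySem.Chars.join_nil]
  | [a] => by simp [PySem.Chars.join_singleton]
  | a :: b :: t => by
      rw [PySem.Chars.join_cons_cons, pvJoinNil (b :: t)]; simp

theorem pvFoldlAppend_toList (vs : List String) : ∀ s : String,
    (vs.foldl (· ++ ·) s).toList = s.toList ++ (vs.map String.toList).flatten := by
  induction vs with
  | nil => simp
  | cons v t ih => intro s; simp [ih]

theorem pvJoin_eq_foldl (vs : List String) :
    PySem.Str.join "" vs = vs.foldl (· ++ ·) "" := by
  apply String.toList_inj.mp
  rw [PySem.Str.toList_join]
  have h0 : ("" : String).toList = [] := rfl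
  rw [h0, pvJoinNil, pvFoldlAppend_toList, h0]
  simp

-- ===== VERDICT (by name: the statement is the Claim_ definition above) =====
theorem parseTxt1ByCaption_spec : Claim_equal_parseTxt1ByCaption := by
  intro lines by_image _ _
  unfold Spec_parseTxt1ByCaption parseTxt1ByCaption parseTxt1ByCaption_alt
  have hg : lines.foldl pvGroupStep PySem.Dict.empty
      = lines.foldl (fun d line => d.modify (pvKey line) [] (fun cur => cur ++ [pvVal line]))
          PySem.Dict.empty := by
    congr 1; funext d line; exact pvGroupStep_eq d line
  have hgnodup := pvNodup_foldl_modify (fun cur v => cur ++ [v]) [] lines PySem.Dict.empty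
    (by simp)
  cases by_image with
  | false =>
    have hA : lines.foldl pvStepNoA PySem.Dict.empty
        = lines.foldl (fun d line => d.modify (pvKey line) [] (fun cur => cur ++ [pvRep0 (pvVal line)]))
            PySem.Dict.empty := by
      congr 1; funext d line; exact pvStepNoA_eq d line
    have hnA := pvNodup_foldl_modify (fun cur v => cur ++ [pvRep0 v]) [] lines PySem.Dict.empty
      (by simp)
    simp only [Bool.not_false, if_true, if_false, hA, hg, Bool.false_eq_true]
    rw [PySem.Dict.items_eq_map_keys _ hnA [],
      PySem.Dict.items_eq_map_keys _ hgnodup [],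
      pvKeys_foldl_modify (fun cur v => cur ++ [pvRep0 v]) [] lines PySem.Dict.empty,
      pvKeys_foldl_modify (fun cur v => cur ++ [v]) [] lines PySem.Dict.empty,
      List.map_map]
    apply List.map_congr_left
    intro k hk
    simp only [Function.comp]
    rw [pvGetD_foldl_modify (fun cur v => cur ++ [pvRep0 v]) [] lines PySem.Dict.empty k,
      pvGetD_foldl_modify (fun cur v => cur ++ [v]) [] lines PySem.Dict.empty k]
    simp [PySem.List.foldl_append_singleton_eq_map,
      List.map_map, pvRep0, Function.comp_def]
  | true =>
    have hA : lines.foldl pvStepImgA PySem.Dict.empty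
        = lines.foldl (fun d line => d.modify (pvKey line) [""] (fun cur => pvImgF cur (pvRepSp (pvVal line))))
            PySem.Dict.empty := by
      congr 1; funext d line; exact pvStepImgA_eq d line
    have hnA := pvNodup_foldl_modify (fun cur v => pvImgF cur (pvRepSp v)) [""] lines
      PySem.Dict.empty (by simp)
    simp only [Bool.not_true, if_true, if_false, hA, hg, Bool.false_eq_true, ite_false]
    rw [PySem.Dict.items_eq_map_keys _ hnA [""],
      PySem.Dict.items_eq_map_keys _ hgnodup [],
      pvKeys_foldl_modify (fun cur v => pvImgF cur (pvRepSp v)) [""] lines PySem.Dict.empty,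
      pvKeys_foldl_modify (fun cur v => cur ++ [v]) [] lines PySem.Dict.empty,
      List.map_map]
    apply List.map_congr_left
    intro k hk
    simp only [Function.comp]
    rw [pvGetD_foldl_modify (fun cur v => pvImgF cur (pvRepSp v)) [""] lines PySem.Dict.empty k,
      pvGetD_foldl_modify (fun cur v => cur ++ [v]) [] lines PySem.Dict.empty k]
    have hfold : ((lines.filter (fun line => pvKey line == k)).map pvVal).foldl
        (fun cur v => pvImgF cur (pvRepSp v)) (PySem.Dict.empty.getD k [""])
        = [(((lines.filter (fun line => pvKey line == k)).map pvVal).map pvRepSp).foldl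
            (· ++ ·) ""] := by
      rw [← List.foldl_map, PySem.Dict.getD_empty, pvFoldl_pvImgF]
    rw [hfold]
    simp [pvJoin_eq_foldl, List.map_map, pvRepSp,
      Function.comp_def, pvFlattenSingleton]
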